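-- pv_equiv track=rewrite | github.com/flaviosmoraes/Meus-Cursos | curso.py | _scan_files
-- ===== SOURCE A (Python) =====
-- def _scan_files(files: list):
--     """
--     Verifica se há arquivos de vídeo (.mp4) e texto (.txt ou .md) em uma lista.
--     """
--     has_mp4 = False
--     has_text = False
--
--     for file in files:
--         if file.lower().endswith('.mp4'):
--             has_mp4 = True
--         elif file.lower().endswith(('.txt', '.md')):
--             has_text = True
--
--     return has_mp4, has_text
-- ===== SOURCE B (Python) =====
-- def _scan_files(files: list):
--     """
--     Verifica se há arquivos de vídeo (.mp4) e texto (.txt ou .md) em uma lista.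
--     """
--     has_mp4 = any(f.lower().endswith('.mp4') for f in files)
--     has_text = any(f.lower().endswith(('.txt', '.md')) for f in files)
--     return has_mp4, has_text
-- ===== Notes on version B (the rewrite author's own statement) =====
-- stated objective: simpler
-- what changed: Replaces the single stateful accumulation loop by two independent short-circuiting any() scans, one per flag; sound because no filename can end with both a video and a text extension.
import Mathlib
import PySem

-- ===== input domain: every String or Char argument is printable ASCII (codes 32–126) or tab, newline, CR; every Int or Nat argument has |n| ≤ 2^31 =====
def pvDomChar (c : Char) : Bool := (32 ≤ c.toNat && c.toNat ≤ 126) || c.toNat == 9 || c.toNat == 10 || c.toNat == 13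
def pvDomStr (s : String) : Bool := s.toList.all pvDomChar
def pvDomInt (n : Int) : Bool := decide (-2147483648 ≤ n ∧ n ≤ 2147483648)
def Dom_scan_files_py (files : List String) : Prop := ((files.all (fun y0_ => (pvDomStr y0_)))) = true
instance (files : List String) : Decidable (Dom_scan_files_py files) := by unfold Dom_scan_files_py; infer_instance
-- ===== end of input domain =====

-- B replaces A's single stateful loop by two independent short-circuiting any scans (objective: simpler).
-- ===== PORT A =====
def scan_files_py (files : List String) : Bool × Bool :=
  files.foldl
    (fun st file =>
      if PySem.Str.endswith (PySem.Str.lower file) ".mp4" then (true, st.2)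
      else if PySem.Str.endswith (PySem.Str.lower file) ".txt" || PySem.Str.endswith (PySem.Str.lower file) ".md" then (st.1, true)
      else st)
    (false, false)

-- ===== PORT B =====
def scan_files_py_alt (files : List String) : Bool × Bool :=
  (files.any (fun f => PySem.Str.endswith (PySem.Str.lower f) ".mp4"),
   files.any (fun f => PySem.Str.endswith (PySem.Str.lower f) ".txt" || PySem.Str.endswith (PySem.Str.lower f) ".md"))

-- ===== PRECONDITION & SPEC =====
def Spec_scan_files_py (files : List String) (out : Bool × Bool) : Prop := out = scan_files_py_alt files
instance (files : List String) (out : Bool × Bool) : Decidable (Spec_scan_files_py files out) := by unfold Spec_scan_files_py; infer_instance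

-- ===== CLAIM (what is proved, stated in full; the proofs are below) =====
def Claim_equal_scan_files_py : Prop := ∀ (files : List String), Dom_scan_files_py files → Spec_scan_files_py files (scan_files_py files)

-- ===== LEMMAS AND PROOFS =====

-- ===== VERDICT (by name: the statement is the Claim_ definition above) =====
-- a string cannot end with '.mp4' and also with '.txt' or '.md'
lemma mp4_text_exclusive (s : String) :
    PySem.Str.endswith s ".mp4" = true →
    (PySem.Str.endswith s ".txt" || PySem.Str.endswith s ".md") = true → False := by
  simp only [PySem.Str.endswith_eq, Bool.or_eq_true, PySem.Chars.endswith_iff]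
  intro h1 h2
  obtain ⟨a, ha⟩ := h1
  have e1 : (".mp4" : String).toList = ['.','m','p','4'] := rfl
  have e2 : (".txt" : String).toList = ['.','t','x','t'] := rfl
  have e3 : (".md" : String).toList = ['.','m','d'] := rfl
  rw [e1] at ha
  rcases h2 with h2 | h2 <;> obtain ⟨b, hb⟩ := h2
  · rw [e2] at hb
    have h := congrArg List.getLast? (ha.trans hb.symm)
    simp [List.getLast?_append] at h
  · rw [e3] at hb
    have h := congrArg List.getLast? (ha.trans hb.symm)
    simp [List.getLast?_append] at h

lemma scan_files_foldl (files : List String) (m t : Bool) :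
    files.foldl
      (fun st file =>
        if PySem.Str.endswith (PySem.Str.lower file) ".mp4" then (true, st.2)
        else if PySem.Str.endswith (PySem.Str.lower file) ".txt" || PySem.Str.endswith (PySem.Str.lower file) ".md" then (st.1, true)
        else st)
      (m, t)
    = (m || files.any (fun f => PySem.Str.endswith (PySem.Str.lower f) ".mp4"),
       t || files.any (fun f => PySem.Str.endswith (PySem.Str.lower f) ".txt" || PySem.Str.endswith (PySem.Str.lower f) ".md")) := by
  induction files generalizing m t with
  | nil => simp only [List.foldl_nil, List.any_nil, Bool.or_false]
  | cons f fs ih =>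
    rw [List.foldl_cons, List.any_cons, List.any_cons]
    by_cases hm : PySem.Str.endswith (PySem.Str.lower f) ".mp4" = true
    · have ht : (PySem.Str.endswith (PySem.Str.lower f) ".txt" || PySem.Str.endswith (PySem.Str.lower f) ".md") = false := by
        cases h : (PySem.Str.endswith (PySem.Str.lower f) ".txt" || PySem.Str.endswith (PySem.Str.lower f) ".md")
        · rfl
        · exact absurd (mp4_text_exclusive _ hm h) (fun x => x)
      rw [if_pos hm, ih, hm, ht]
      cases m <;> cases t <;> rfl
    · rw [if_neg hm]
      have hm' : PySem.Str.endswith (PySem.Str.lower f) ".mp4" = false := by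
        cases h : PySem.Str.endswith (PySem.Str.lower f) ".mp4"
        · rfl
        · exact absurd h hm
      by_cases ht : (PySem.Str.endswith (PySem.Str.lower f) ".txt" || PySem.Str.endswith (PySem.Str.lower f) ".md") = true
      · rw [if_pos ht, ih, hm', ht]
        cases m <;> cases t <;> rfl
      · have ht' : (PySem.Str.endswith (PySem.Str.lower f) ".txt" || PySem.Str.endswith (PySem.Str.lower f) ".md") = false := by
          cases h : (PySem.Str.endswith (PySem.Str.lower f) ".txt" || PySem.Str.endswith (PySem.Str.lower f) ".md")
          · rfl
          · exact absurd h ht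
        rw [if_neg ht, ih, hm', ht']
        cases m <;> cases t <;> rfl

theorem scan_files_py_spec : Claim_equal_scan_files_py := by
  intro files _
  unfold Spec_scan_files_py scan_files_py scan_files_py_alt
  rw [scan_files_foldl]
  rfl
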